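-- pv_equiv track=rewrite | github.com/ateekshSood/PDSA | week9/prob_1.py | constructWord
-- ===== SOURCE A (Python) =====
-- def constructWord(word , wordList , memo = None):
--
--     if memo == None:
--         memo = {}
--
--     if word in memo:
--         return memo[word]
--
--     if word == "":
--         return [[]]
--
--     total_ways = []
--
--     for prefix in wordList:
--
--         if word[:len(prefix)] == prefix:
--
--             suffix = word[len(prefix):]
--
--             suffix_ways = constructWord(suffix , wordList , memo)
--
--             for way in suffix_ways:
--
--                 total_ways.append([prefix] + way)
--
--
--     memo[word] = total_ways
--
--     return memo[word]
-- ===== SOURCE B (Python) =====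
-- def constructWord(word, wordList, memo=None):
--     if memo is None:
--         memo = {}
--     n = len(word)
--     table = [None] * (n + 1)
--     for i in range(n, -1, -1):
--         suffix = word[i:]
--         if suffix in memo:
--             table[i] = memo[suffix]
--         elif i == n:
--             table[i] = [[]]
--         else:
--             ways = []
--             for p in wordList:
--                 if p != "" and word[i:i + len(p)] == p:
--                     for way in table[i + len(p)]:
--                         ways.append([p] + way)
--             table[i] = ways
--     return table[0]
-- ===== Notes on version B (the rewrite author's own statement) =====
-- stated objective: alternative
-- what changed: Replaces A's memoised top-down recursion by bottom-up dynamic programming: a table over positions of word filled from the end, so the result is assembled iteratively without recursion (return value only: A also mutates a caller-supplied memo dict, B only reads it).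
-- crash fix: When "" is in wordList and word is neither "" nor a key of the supplied memo, A raises RecursionError (infinite recursion on the empty prefix); B returns the ways built from the non-empty wordList entries. — e.g. on constructWord("ab", (["", "a", "b"], none)): A raises RecursionError, B returns [["a", "b"]]
import Mathlib
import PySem

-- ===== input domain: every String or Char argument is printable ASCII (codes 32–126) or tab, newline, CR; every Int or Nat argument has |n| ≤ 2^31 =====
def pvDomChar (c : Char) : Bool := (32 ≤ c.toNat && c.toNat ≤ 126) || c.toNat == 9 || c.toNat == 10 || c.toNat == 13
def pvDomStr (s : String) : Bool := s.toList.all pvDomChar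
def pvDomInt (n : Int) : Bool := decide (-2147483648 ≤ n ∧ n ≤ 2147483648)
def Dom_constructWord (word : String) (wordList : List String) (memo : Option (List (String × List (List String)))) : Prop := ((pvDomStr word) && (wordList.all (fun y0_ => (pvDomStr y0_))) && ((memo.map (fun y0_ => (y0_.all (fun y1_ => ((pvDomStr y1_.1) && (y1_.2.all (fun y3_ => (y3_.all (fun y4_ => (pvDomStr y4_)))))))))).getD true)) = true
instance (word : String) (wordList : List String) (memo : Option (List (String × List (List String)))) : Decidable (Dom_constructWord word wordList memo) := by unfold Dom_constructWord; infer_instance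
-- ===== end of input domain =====

-- B replaces A's memoised top-down recursion by a bottom-up table over positions of `word` (simpler control flow,
-- no recursion). Equality is about the RETURN value only: A mutates a caller-supplied memo dict, B only reads it.

-- ===== PORT A =====
-- shared by both ports: the Python parameter default `memo = None` / `if memo == None: memo = {}`
def dictOfMemo (memo : Option (List (String × List (List String)))) : PySem.Dict String (List (List String)) :=
  match memo with
  | none => PySem.Dict.empty
  | some l => PySem.Dict.ofList l

-- A's recursion, word as its char list; fuel bounds the recursion depth (word shrinks strictly under Pre_);
-- the state is (total_ways so far, current memo dict), threaded exactly as Python's mutation does.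
def goA (wordList : List String) : Nat → List Char → PySem.Dict String (List (List String)) →
    (List (List String) × PySem.Dict String (List (List String)))
  | 0, _, m => ([], m)  -- fuel exhausted: unreachable on inputs satisfying Pre_
  | fuel + 1, w, m =>
    match m.get? (String.ofList w) with
    | some v => (v, m)
    | none =>
      if w = [] then ([[]], m)
      else
        let r := wordList.foldl (fun acc p =>
          if w.take p.toList.length = p.toList then
            let res := goA wordList fuel (w.drop p.toList.length) acc.2
            (acc.1 ++ res.1.map (fun way => p :: way), res.2)
          else acc) (([] : List (List String)), m)
        (r.1, r.2.insert (String.ofList w) r.1)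

def constructWord (word : String) (wordList : List String) (memo : Option (List (String × List (List String)))) : List (List String) :=
  (goA wordList (word.toList.length + 1) word.toList (dictOfMemo memo)).1

-- ===== PORT B =====
-- one table entry: the ways for the suffix s = word[i:]; `rest` is the already-built table for positions i+1 … n
def entryB (wordList : List String) (m : PySem.Dict String (List (List String)))
    (s : List Char) (rest : List (List (List String))) : List (List String) :=
  match m.get? (String.ofList s) with
  | some v => v
  | none =>
    if s = [] then [[]]
    else
      wordList.foldl (fun ways p =>
        if p.toList ≠ [] ∧ s.take p.toList.length = p.toList then
          ways ++ (rest.getD (p.toList.length - 1) []).map (fun way => p :: way)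
        else ways) []

-- Source B's descending loop `for i in range(n, -1, -1)` building table[i..n]: structural recursion from the word's tail
def tblB (wordList : List String) (m : PySem.Dict String (List (List String))) :
    List Char → List (List (List String))
  | [] => [entryB wordList m [] []]
  | c :: cs => entryB wordList m (c :: cs) (tblB wordList m cs) :: tblB wordList m cs

def constructWord_alt (word : String) (wordList : List String) (memo : Option (List (String × List (List String)))) : List (List String) :=
  (tblB wordList (dictOfMemo memo) word.toList).getD 0 []

-- ===== PRECONDITION & SPEC =====
-- Pre_ excludes exactly the inputs where A never returns: with "" in wordList, any word that is neither empty
-- nor a key of the given memo makes A recurse on itself forever (RecursionError).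
def Pre_constructWord (word : String) (wordList : List String) (memo : Option (List (String × List (List String)))) : Prop :=
  "" ∈ wordList → (word = "" ∨ word ∈ (memo.getD []).map Prod.fst)
instance (word : String) (wordList : List String) (memo : Option (List (String × List (List String)))) : Decidable (Pre_constructWord word wordList memo) := by unfold Pre_constructWord; infer_instance

def pvWitness_constructWord : String × List String × (Option (List (String × List (List String)))) :=
  ("ab", (["a", "b"], none))

-- On inputs with "" in wordList and word neither "" nor a memo key, A raises RecursionError; B returns the
-- list of ways built from the non-empty list entries.
def Raises_constructWord (word : String) (wordList : List String) (memo : Option (List (String × List (List String)))) : Prop :=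
  "" ∈ wordList ∧ word ≠ "" ∧ word ∉ (memo.getD []).map Prod.fst
instance (word : String) (wordList : List String) (memo : Option (List (String × List (List String)))) : Decidable (Raises_constructWord word wordList memo) := by unfold Raises_constructWord; infer_instance
def pvRaiseWitness_constructWord : String × List String × (Option (List (String × List (List String)))) :=
  ("ab", (["", "a", "b"], none))
def pvRaiseWitnessOut_constructWord : List (List String) := [["a", "b"]]

def Spec_constructWord (word : String) (wordList : List String) (memo : Option (List (String × List (List String)))) (out : List (List String)) : Prop := out = constructWord_alt word wordList memo
instance (word : String) (wordList : List String) (memo : Option (List (String × List (List String)))) (out : List (List String)) : Decidable (Spec_constructWord word wordList memo out) := by unfold Spec_constructWord; infer_instance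

-- ===== CLAIM (what is proved, stated in full; the proofs are below) =====
def Claim_equal_constructWord : Prop := ∀ (word : String) (wordList : List String) (memo : Option (List (String × List (List String)))), Dom_constructWord word wordList memo → Pre_constructWord word wordList memo → Spec_constructWord word wordList memo (constructWord word wordList memo)

-- crash-fix claim (situation (2)); proved at the bottom as theorem constructWord_raises
def Claim_raises_constructWord : Prop := (∀ (word : String) (wordList : List String) (memo : Option (List (String × List (List String)))), Dom_constructWord word wordList memo → Raises_constructWord word wordList memo → ¬ Pre_constructWord word wordList memo) ∧ (Dom_constructWord (pvRaiseWitness_constructWord.1) (pvRaiseWitness_constructWord.2.1) (pvRaiseWitness_constructWord.2.2) ∧ Raises_constructWord (pvRaiseWitness_constructWord.1) (pvRaiseWitness_constructWord.2.1) (pvRaiseWitness_constructWord.2.2) ∧ constructWord_alt (pvRaiseWitness_constructWord.1) (pvRaiseWitness_constructWord.2.1) (pvRaiseWitness_constructWord.2.2) = pvRaiseWitnessOut_constructWord)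

-- ===== LEMMAS AND PROOFS =====

-- The common value both ports compute: the fuelled pure spec (fuel > length of the suffix suffices).
def Wf (wordList : List String) (m0 : PySem.Dict String (List (List String))) :
    Nat → List Char → List (List String)
  | 0, _ => []
  | fuel + 1, s =>
    match m0.get? (String.ofList s) with
    | some v => v
    | none =>
      if s = [] then [[]]
      else
        wordList.foldl (fun ways p =>
          if p.toList ≠ [] ∧ s.take p.toList.length = p.toList then
            ways ++ (Wf wordList m0 fuel (s.drop p.toList.length)).map (fun way => p :: way)
          else ways) []

def Wc (wordList : List String) (m0 : PySem.Dict String (List (List String))) (s : List Char) : List (List String) :=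
  Wf wordList m0 (s.length + 1) s

lemma matchLen {s : List Char} {p : String} (h : s.take p.toList.length = p.toList)
    (hp : p.toList ≠ []) : 1 ≤ p.toList.length ∧ p.toList.length ≤ s.length := by
  have h1 : 1 ≤ p.toList.length := List.length_pos_of_ne_nil hp
  have h2 := congrArg List.length h
  rw [List.length_take] at h2
  omega

lemma fuelIrrel (wordList : List String) (m0 : PySem.Dict String (List (List String))) :
    ∀ f1 f2 (s : List Char), s.length < f1 → s.length < f2 →
      Wf wordList m0 f1 s = Wf wordList m0 f2 s := by
  intro f1
  induction f1 with
  | zero => intro f2 s h1 _; omega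
  | succ a ih =>
    intro f2 s h1 h2
    cases f2 with
    | zero => omega
    | succ b =>
      simp only [Wf]
      cases hm : m0.get? (String.ofList s) with
      | some v => rfl
      | none =>
        by_cases hs : s = []
        · simp [hs]
        · simp only [hs]
          refine PySem.List.foldl_congr_mem _ _ _ _ ?_
          intro acc p _
          by_cases hc : p.toList ≠ [] ∧ s.take p.toList.length = p.toList
          · have hl := matchLen hc.2 hc.1
            rw [if_pos hc, if_pos hc, ih b (s.drop p.toList.length)
              (by rw [List.length_drop]; omega) (by rw [List.length_drop]; omega)]
          · rw [if_neg hc, if_neg hc]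

-- B computes Wc at every table position
lemma tbl_spec (wordList : List String) (m0 : PySem.Dict String (List (List String))) :
    ∀ (s : List Char) (j : Nat), j ≤ s.length →
      (tblB wordList m0 s).getD j [] = Wc wordList m0 (s.drop j) := by
  intro s
  induction s with
  | nil =>
    intro j hj
    cases j with
    | succ j' => exact absurd hj (by simp)
    | zero =>
    simp only [tblB, List.getD_cons_zero, List.drop_nil]
    cases hm : m0.get? (String.ofList []) <;> simp [entryB, Wc, Wf, hm]
  | cons c cs ih =>
    intro j hj
    cases j with
    | succ j' =>
      simp only [tblB, List.getD_cons_succ, List.drop_succ_cons]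
      exact ih j' (by simpa using hj)
    | zero =>
      simp only [tblB, List.getD_cons_zero, List.drop_zero]
      show entryB wordList m0 (c :: cs) (tblB wordList m0 cs) = Wc wordList m0 (c :: cs)
      simp only [entryB, Wc, Wf]
      cases hm : m0.get? (String.ofList (c :: cs)) with
      | some v => rfl
      | none =>
        simp only []
        have hne : (c :: cs) ≠ ([] : List Char) := by simp
        rw [if_neg hne, if_neg hne]
        refine PySem.List.foldl_congr_mem _ _ _ _ ?_
        intro acc p _
        by_cases hc : p.toList ≠ [] ∧ (c :: cs).take p.toList.length = p.toList
        · have hl := matchLen hc.2 hc.1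
          have hl' : p.toList.length ≤ cs.length + 1 := by
            have h2 := hl.2; rw [List.length_cons] at h2; exact h2
          have hl1 := hl.1
          have hd : (c :: cs).drop p.toList.length = cs.drop (p.toList.length - 1) := by
            cases hq : p.toList with
            | nil => exact absurd hq hc.1
            | cons a t =>
              simp only [List.length_cons, List.drop_succ_cons, Nat.add_sub_cancel]
          have := ih (p.toList.length - 1) (by omega)
          rw [if_pos hc, if_pos hc, this, hd]
          rw [Wc, fuelIrrel wordList m0 ((cs.drop (p.toList.length - 1)).length + 1)
                ((c :: cs).length) (cs.drop (p.toList.length - 1))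
                (by omega)
                (by rw [List.length_drop, List.length_cons]; omega)]
        · rw [if_neg hc, if_neg hc]

lemma alt_eq_Wc (word : String) (wordList : List String) (memo : Option (List (String × List (List String)))) :
    constructWord_alt word wordList memo = Wc wordList (dictOfMemo memo) word.toList := by
  have := tbl_spec wordList (dictOfMemo memo) word.toList 0 (Nat.zero_le _)
  simpa [constructWord_alt] using this

-- invariant on A's evolving memo: every entry is either an original one or the spec value of its key
def GoodM (wordList : List String) (m0 m : PySem.Dict String (List (List String))) : Prop :=
  ∀ k, m.get? k = m0.get? k ∨ (m0.get? k = none ∧ m.get? k = some (Wc wordList m0 k.toList))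

lemma foldW_out (wordList : List String) (m0 : PySem.Dict String (List (List String)))
    (f : Nat) (w : List Char) :
    ∀ (ps : List String) (a : List (List String)),
      ps.foldl (fun ways p =>
          if p.toList ≠ [] ∧ w.take p.toList.length = p.toList then
            ways ++ (Wf wordList m0 f (w.drop p.toList.length)).map (fun way => p :: way)
          else ways) a
        = a ++ ps.foldl (fun ways p =>
          if p.toList ≠ [] ∧ w.take p.toList.length = p.toList then
            ways ++ (Wf wordList m0 f (w.drop p.toList.length)).map (fun way => p :: way)
          else ways) [] := by
  intro ps
  induction ps with
  | nil => intro a; simp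
  | cons p ps ih =>
    intro a
    by_cases hc : p.toList ≠ [] ∧ w.take p.toList.length = p.toList
    · simp only [List.foldl_cons, if_pos hc, List.nil_append, ih
        (a ++ (Wf wordList m0 f (w.drop p.toList.length)).map (fun way => p :: way)),
        ih ((Wf wordList m0 f (w.drop p.toList.length)).map (fun way => p :: way)),
        List.append_assoc]
    · simp only [List.foldl_cons, if_neg hc, ih a]

lemma goA_spec (wordList : List String) (m0 : PySem.Dict String (List (List String)))
    (hε : ∀ p ∈ wordList, p.toList ≠ []) :
    ∀ (fuel : Nat) (w : List Char) (m : PySem.Dict String (List (List String))),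
      w.length < fuel → GoodM wordList m0 m →
      (goA wordList fuel w m).1 = Wc wordList m0 w ∧ GoodM wordList m0 (goA wordList fuel w m).2 := by
  intro fuel
  induction fuel with
  | zero => intro w m hw _; omega
  | succ f ih =>
    intro w m hw hG
    simp only [goA]
    cases hm : m.get? (String.ofList w) with
    | some v =>
      rcases hG (String.ofList w) with h | ⟨h0, hv⟩
      · have hv0 : m0.get? (String.ofList w) = some v := by rw [← h, hm]
        constructor
        · simp only [Wc, Wf, hv0]
        · exact hG
      · rw [hm] at hv
        constructor
        · simpa [String.toList_ofList] using (Option.some.inj hv)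
        · exact hG
    | none =>
      have hm0 : m0.get? (String.ofList w) = none := by
        rcases hG (String.ofList w) with h | ⟨h0, hv⟩
        · rw [← h, hm]
        · exact h0
      by_cases hw0 : w = []
      · subst hw0
        exact ⟨by simp [Wc, Wf, hm0], hG⟩
      · rw [if_neg hw0]
        -- the loop over wordList
        have hfold : ∀ (ps : List String), (∀ p ∈ ps, p.toList ≠ []) →
            ∀ (acc : List (List String)) (m' : PySem.Dict String (List (List String))),
            GoodM wordList m0 m' →
            (ps.foldl (fun acc p =>
                if w.take p.toList.length = p.toList then
                  let res := goA wordList f (w.drop p.toList.length) acc.2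
                  (acc.1 ++ res.1.map (fun way => p :: way), res.2)
                else acc) (acc, m')).1
              = acc ++ ps.foldl (fun ways p =>
                  if p.toList ≠ [] ∧ w.take p.toList.length = p.toList then
                    ways ++ (Wf wordList m0 f (w.drop p.toList.length)).map (fun way => p :: way)
                  else ways) []
            ∧ GoodM wordList m0
                (ps.foldl (fun acc p =>
                  if w.take p.toList.length = p.toList then
                    let res := goA wordList f (w.drop p.toList.length) acc.2
                    (acc.1 ++ res.1.map (fun way => p :: way), res.2)
                  else acc) (acc, m')).2 := by
          intro ps
          induction ps with
          | nil => intro _ acc m' hG'; exact ⟨by simp, hG'⟩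
          | cons p ps ihp =>
            intro hps acc m' hG'
            have hpε : p.toList ≠ [] := hps p (by simp)
            by_cases hc : w.take p.toList.length = p.toList
            · have hl := matchLen hc hpε
              have hrec := ih (w.drop p.toList.length) m'
                (by rw [List.length_drop]; omega) hG'
              have hcc : p.toList ≠ [] ∧ w.take p.toList.length = p.toList := ⟨hpε, hc⟩
              simp only [List.foldl_cons, if_pos hc, if_pos hcc]
              have hres := ihp (fun q hq => hps q (by simp [hq]))
                (acc ++ ((goA wordList f (w.drop p.toList.length) m').1).map (fun way => p :: way))
                (goA wordList f (w.drop p.toList.length) m').2 hrec.2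
              refine ⟨?_, hres.2⟩
              rw [hres.1, hrec.1]
              have hWf : Wf wordList m0 f (w.drop p.toList.length)
                  = Wc wordList m0 (w.drop p.toList.length) := by
                rw [Wc]
                exact fuelIrrel wordList m0 f ((w.drop p.toList.length).length + 1)
                  (w.drop p.toList.length) (by rw [List.length_drop]; omega) (by omega)
              rw [List.nil_append,
                foldW_out wordList m0 f w ps
                  ((Wf wordList m0 f (w.drop p.toList.length)).map (fun way => p :: way)),
                hWf, List.append_assoc]
            · have hcc : ¬ (p.toList ≠ [] ∧ w.take p.toList.length = p.toList) := fun h => hc h.2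
              simp only [List.foldl_cons, if_neg hc, if_neg hcc]
              exact ihp (fun q hq => hps q (by simp [hq])) acc m' hG'
        have hmain := hfold wordList hε [] m hG
        constructor
        · rw [hmain.1]
          simp only [Wc, Wf, hm0, if_neg hw0, List.nil_append]
          have hlf : ∀ (ps : List String),
              ps.foldl (fun ways p =>
                if p.toList ≠ [] ∧ w.take p.toList.length = p.toList then
                  ways ++ (Wf wordList m0 f (w.drop p.toList.length)).map (fun way => p :: way)
                else ways) []
              = ps.foldl (fun ways p =>
                if p.toList ≠ [] ∧ w.take p.toList.length = p.toList then
                  ways ++ (Wf wordList m0 w.length (w.drop p.toList.length)).map (fun way => p :: way)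
                else ways) [] := by
            intro ps
            refine PySem.List.foldl_congr_mem _ _ _ _ ?_
            intro acc p _
            by_cases hc : p.toList ≠ [] ∧ w.take p.toList.length = p.toList
            · have hl := matchLen hc.2 hc.1
              rw [if_pos hc, if_pos hc,
                fuelIrrel wordList m0 f w.length (w.drop p.toList.length)
                  (by have hpl : p.toList.length = p.length := by simp
                      simp only [List.length_drop]; omega)
                  (by have hpl : p.toList.length = p.length := by simp
                      simp only [List.length_drop]; omega)]
            · rw [if_neg hc, if_neg hc]
          exact hlf wordList
        · -- Good is preserved by the final insert of the freshly computed value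
          intro k
          by_cases hk : k = String.ofList w
          · subst hk
            right
            refine ⟨hm0, ?_⟩
            rw [PySem.Dict.get?_insert_self, hmain.1]
            simp only [List.nil_append, String.toList_ofList]
            congr 1
            · simp only [Wc, Wf, hm0, if_neg hw0]
              refine PySem.List.foldl_congr_mem _ _ _ _ ?_
              intro acc p _
              by_cases hc : p.toList ≠ [] ∧ w.take p.toList.length = p.toList
              · have hl := matchLen hc.2 hc.1
                rw [if_pos hc, if_pos hc,
                  fuelIrrel wordList m0 f w.length (w.drop p.toList.length)
                    (by have hpl : p.toList.length = p.length := by simp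
                        simp only [List.length_drop]; omega)
                    (by have hpl : p.toList.length = p.length := by simp
                        simp only [List.length_drop]; omega)]
              · rw [if_neg hc, if_neg hc]
          · rw [PySem.Dict.get?_insert_of_ne _ _ hk]
            exact hmain.2 k

lemma memoHit (l : List (String × List (List String))) (k : String) (hk : k ∈ l.map Prod.fst) :
    ∃ v, (PySem.Dict.ofList l).get? k = some v := by
  suffices h : ∀ (l : List (String × List (List String))) (d : PySem.Dict String (List (List String))),
      ((∃ v, d.get? k = some v) ∨ k ∈ l.map Prod.fst) →
      ∃ v, ((l.foldl (fun a p => a.insert p.1 p.2) d).get? k = some v) by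
    exact h l PySem.Dict.empty (Or.inr hk)
  intro l
  induction l with
  | nil =>
    intro d hd
    rcases hd with h | h
    · exact h
    · simp at h
  | cons p ps ihl =>
    intro d hd
    simp only [List.foldl_cons]
    apply ihl
    by_cases hkp : k = p.1
    · subst hkp
      exact Or.inl ⟨p.2, PySem.Dict.get?_insert_self _ _ _⟩
    · rcases hd with ⟨v, hv⟩ | h
      · exact Or.inl ⟨v, by rw [PySem.Dict.get?_insert_of_ne _ _ hkp]; exact hv⟩
      · simp only [List.map_cons, List.mem_cons] at h
        rcases h with h | h
        · exact absurd h hkp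
        · exact Or.inr h

-- ===== VERDICT (by name: the statement is the Claim_ definition above) =====
theorem constructWord_spec : Claim_equal_constructWord := by
  intro word wordList memo _ hpre
  unfold Spec_constructWord
  rw [alt_eq_Wc]
  by_cases hempty : "" ∈ wordList
  case neg =>
    have hε : ∀ p ∈ wordList, p.toList ≠ [] := fun p hp h0 =>
      hempty (by rwa [String.toList_eq_nil_iff.mp h0] at hp)
    exact ((goA_spec wordList (dictOfMemo memo) hε (word.toList.length + 1) word.toList
      (dictOfMemo memo) (by omega) (fun k => Or.inl rfl)).1)
  case pos =>
    rcases hpre hempty with hw0 | hmem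
    · subst hw0
      show (goA wordList 1 "".toList (dictOfMemo memo)).1 = Wc wordList (dictOfMemo memo) "".toList
      have : "".toList = ([] : List Char) := rfl
      rw [this]
      simp only [goA, Wc, Wf]
      cases hm : (dictOfMemo memo).get? (String.ofList []) <;> simp
    · obtain ⟨v, hv⟩ : ∃ v, (dictOfMemo memo).get? word = some v := by
        cases memo with
        | none => simp at hmem
        | some l => exact memoHit l word (by simpa using hmem)
      have hv' : (dictOfMemo memo).get? (String.ofList word.toList) = some v := by
        rwa [String.ofList_toList]
      show (goA wordList (word.toList.length + 1) word.toList (dictOfMemo memo)).1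
        = Wc wordList (dictOfMemo memo) word.toList
      simp only [goA, Wc, Wf, hv']

def constructWord_raises : Claim_raises_constructWord := by
  unfold Claim_raises_constructWord
  constructor
  · intro word wordList memo _ hr hpre
    rcases hpre hr.1 with h | h
    · exact hr.2.1 h
    · exact hr.2.2 h
  · exact ⟨by decide, by decide, by decide⟩
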